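-- pv_equiv track=rewrite | github.com/XyzHuy/-DL-Fine-tuning-coding-model | data/solution/Solution2107.py | shareCandies
-- ===== SOURCE A (Python) =====
-- from typing import List
-- from collections import Counter
--
-- def shareCandies(candies: List[int], k: int) -> int:
--     # Count the frequency of each candy flavor
--     candy_count = Counter(candies)
--
--     # If k is 0, we don't give any candies to the sister
--     if k == 0:
--         return len(candy_count)
--
--     # Initialize the maximum unique flavors we can keep
--     max_unique_flavors = 0
--
--     # Use a sliding window to find the maximum unique flavors
--     for i in range(len(candies)):
--         # Remove the candy that is going to be given to the sister
--         candy_count[candies[i]] -= 1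
--         if candy_count[candies[i]] == 0:
--             del candy_count[candies[i]]
--
--         # Once we have considered k candies to give to the sister
--         if i >= k - 1:
--             # Count the unique flavors we can keep
--             max_unique_flavors = max(max_unique_flavors, len(candy_count))
--             # Add back the candy that is sliding out of the window
--             candy_count[candies[i - k + 1]] += 1
--
--     return max_unique_flavors
-- ===== SOURCE B (Python) =====
-- def shareCandies(candies, k):
--     n = len(candies)
--     last = {x: i for i, x in enumerate(candies)}
--     first = {x: n - 1 - i for i, x in enumerate(reversed(candies))}
--     distinct = len(last)
--     if k == 0:
--         return distinct
--     if k > n: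
--         return 0
--     # Flavor x disappears from the kept candies exactly for the window starts s
--     # with max(0, last[x] - k + 1) <= s <= min(first[x], n - k).  Mark each such
--     # interval in a difference array, scan prefix sums, and keep the smallest
--     # number of vanished flavors over all window starts.
--     cover = [0] * (n - k + 2)
--     for x, f in first.items():
--         lo = last[x] - k + 1
--         if lo < 0:
--             lo = 0
--         hi = f if f < n - k else n - k
--         if lo <= hi:
--             cover[lo] += 1
--             cover[hi + 1] -= 1
--     worst = distinct
--     cur = 0
--     for s in range(n - k + 1):
--         cur += cover[s]
--         if cur < worst:
--             worst = cur
--     return distinct - worst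
-- ===== Notes on version B (the rewrite author's own statement) =====
-- stated objective: alternative
-- what changed: Replaces the sliding-window Counter (per-element dict decrement/delete/re-insert plus a len() per window) by an occurrence-interval formulation: one pass records each flavor's first and last position, each flavor marks the interval of window starts that would swallow it in a difference array, and a prefix-sum scan takes the minimum overlap; answer = distinct - that minimum.
import Mathlib
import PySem

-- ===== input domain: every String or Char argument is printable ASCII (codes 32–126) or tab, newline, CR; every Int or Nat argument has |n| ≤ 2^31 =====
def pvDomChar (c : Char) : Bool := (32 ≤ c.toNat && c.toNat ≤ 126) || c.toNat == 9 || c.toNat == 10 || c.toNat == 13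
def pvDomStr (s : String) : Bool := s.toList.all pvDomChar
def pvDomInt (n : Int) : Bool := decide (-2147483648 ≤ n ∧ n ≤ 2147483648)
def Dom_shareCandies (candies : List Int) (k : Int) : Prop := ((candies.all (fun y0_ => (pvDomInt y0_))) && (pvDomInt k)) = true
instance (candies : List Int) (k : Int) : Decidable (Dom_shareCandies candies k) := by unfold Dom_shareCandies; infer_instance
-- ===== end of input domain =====

-- B replaces A's sliding-window Counter by a first/last-occurrence interval count plus a
-- difference array over window starts (objective: a genuinely different algorithm, same cost).

-- ===== PORT A =====
def shareCandies (candies : List Int) (k : Int) : Int :=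
  let candyCount := PySem.Dict.counter candies
  if k = 0 then (candyCount.size : Int)
  else
    let st := (PySem.List.pyRange 0 (candies.length : Int)).foldl
      (fun (st : PySem.Dict Int Int × Int) i =>
        let cc := st.1
        let mx := st.2
        let x := PySem.List.pyGetD candies i 0
        let cc := cc.modify x 0 (· - 1)
        let cc := if cc.getD x 0 = 0 then cc.erase x else cc
        if i ≥ k - 1 then
          let mx := max mx (cc.size : Int)
          let y := PySem.List.pyGetD candies (i - k + 1) 0
          (cc.modify y 0 (· + 1), mx)
        else (cc, mx))
      (candyCount, 0)
    st.2

-- ===== PORT B =====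
def shareCandies_alt (candies : List Int) (k : Int) : Int :=
  let n : Int := (candies.length : Int)
  let last := (PySem.List.enumerate candies).foldl
    (fun (d : PySem.Dict Int Int) p => d.insert p.2 p.1) PySem.Dict.empty
  let first := (PySem.List.enumerate candies.reverse).foldl
    (fun (d : PySem.Dict Int Int) p => d.insert p.2 (n - 1 - p.1)) PySem.Dict.empty
  let distinct : Int := (last.size : Int)
  if k = 0 then distinct
  else if k > n then 0
  else
    let cover : List Int := List.replicate (n - k + 2).toNat 0
    let cover := first.items.foldl
      (fun (cover : List Int) p =>
        let lo := last.getD p.1 0 - k + 1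
        let lo := if lo < 0 then 0 else lo
        let hi := if p.2 < n - k then p.2 else n - k
        if lo ≤ hi then
          let cover := PySem.List.pySetD cover lo (PySem.List.pyGetD cover lo 0 + 1)
          PySem.List.pySetD cover (hi + 1) (PySem.List.pyGetD cover (hi + 1) 0 - 1)
        else cover)
      cover
    let st := (PySem.List.pyRange 0 (n - k + 1)).foldl
      (fun (st : Int × Int) s =>
        let worst := st.1
        let cur := st.2 + PySem.List.pyGetD cover s 0
        (if cur < worst then cur else worst, cur))
      (distinct, 0)
    distinct - st.1

-- ===== PRECONDITION & SPEC =====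
-- Pre_ excludes only inputs where A raises: for k < 0 with nonempty candies A's add-back
-- index i - k + 1 runs past the end of the list (IndexError).
def Pre_shareCandies (candies : List Int) (k : Int) : Prop := 0 ≤ k ∨ candies = []
instance (candies : List Int) (k : Int) : Decidable (Pre_shareCandies candies k) := by
  unfold Pre_shareCandies; infer_instance
def pvWitness_shareCandies : List Int × Int := ([1, 1, 2, 3, 2], 2)

def Spec_shareCandies (candies : List Int) (k : Int) (out : Int) : Prop := out = shareCandies_alt candies k
instance (candies : List Int) (k : Int) (out : Int) : Decidable (Spec_shareCandies candies k out) := by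
  unfold Spec_shareCandies; infer_instance

-- ===== CLAIM (what is proved, stated in full; the proofs are below) =====
def Claim_equal_shareCandies : Prop := ∀ (candies : List Int) (k : Int), Dom_shareCandies candies k → Pre_shareCandies candies k → Spec_shareCandies candies k (shareCandies candies k)

-- ===== LEMMAS AND PROOFS =====

-- Spec-level quantities: first/last occurrence index, distinct count, and the number of
-- flavors wholly inside the window of length K starting at s.
def pvFIdx (cs : List Int) (x : Int) : Nat := cs.idxOf x
def pvLIdx (cs : List Int) (x : Int) : Nat := cs.length - 1 - cs.reverse.idxOf x
def pvD (cs : List Int) : Nat := (PySem.Set.ofList cs).length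
def pvInside (cs : List Int) (K s : Nat) : Nat :=
  (PySem.Set.ofList cs).countP (fun x => decide (s ≤ pvFIdx cs x) && decide (pvLIdx cs x + 1 ≤ s + K))
def pvRef (cs : List Int) (K : Nat) : Int :=
  ((List.range (cs.length + 1 - K)).map (fun s => (pvD cs : Int) - (pvInside cs K s : Int))).foldl max 0
def pvWin (cs : List Int) (K i : Nat) : List Int := (cs.take i).drop (i - (K - 1))
def pvResid (cs : List Int) (K i : Nat) (x : Int) : Nat := cs.count x - (pvWin cs K i).count x

-- ---- generic Dict facts (get?/erase; the library has no erase lemmas) ----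
theorem pv_get?_eq_some_of_contains {κ ν : Type} [BEq κ] (d : PySem.Dict κ ν) (k : κ) (d0 : ν)
    (h : d.contains k = true) : d.get? k = some (d.getD k d0) := by
  rw [PySem.Dict.contains_eq_isSome_get?] at h
  cases hg : d.get? k with
  | none => rw [hg] at h; simp at h
  | some v => simp [PySem.Dict.getD_eq_get?_getD, hg]

theorem pv_get?_eq_none_of_not_contains {κ ν : Type} [BEq κ] (d : PySem.Dict κ ν) (k : κ)
    (h : d.contains k = false) : d.get? k = none := by
  rw [PySem.Dict.contains_eq_isSome_get?] at h
  cases hg : d.get? k with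
  | none => rfl
  | some v => rw [hg] at h; simp at h

theorem pv_get?_modify_self {κ ν : Type} [BEq κ] [LawfulBEq κ] [DecidableEq κ]
    (d : PySem.Dict κ ν) (k : κ) (d0 : ν) (f : ν → ν) :
    (d.modify k d0 f).get? k = some (f (d.getD k d0)) := by
  have hc : (d.modify k d0 f).contains k = true := by
    rw [PySem.Dict.contains_modify]; simp
  rw [pv_get?_eq_some_of_contains _ _ d0 hc, PySem.Dict.getD_modify]
  simp

theorem pv_get?_modify_of_ne {κ ν : Type} [BEq κ] [LawfulBEq κ] [DecidableEq κ]
    (d : PySem.Dict κ ν) (k k' : κ) (d0 : ν) (f : ν → ν) (h : k' ≠ k) :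
    (d.modify k d0 f).get? k' = d.get? k' := by
  have hc : (d.modify k d0 f).contains k' = d.contains k' := by
    rw [PySem.Dict.contains_modify]
    simp [h]
  cases hcc : d.contains k' with
  | false =>
      rw [pv_get?_eq_none_of_not_contains _ _ (by rw [hc, hcc]),
        pv_get?_eq_none_of_not_contains _ _ hcc]
  | true =>
      rw [pv_get?_eq_some_of_contains _ _ d0 (by rw [hc, hcc]),
        pv_get?_eq_some_of_contains _ _ d0 hcc, PySem.Dict.getD_modify]
      simp [h]

theorem pv_find?_filter_ne {κ ν : Type} [BEq κ] [LawfulBEq κ] (l : List (κ × ν)) (k q : κ)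
    (h : q ≠ k) :
    (l.filter (fun p => !(p.1 == k))).find? (fun p => p.1 == q) = l.find? (fun p => p.1 == q) := by
  induction l with
  | nil => rfl
  | cons a t ih =>
    by_cases ha : a.1 = k
    · have h1 : (a.1 == k) = true := by simp [ha]
      have h2 : (a.1 == q) = false := by simp [ha]; intro hqk; exact h hqk.symm
      simp [h1, h2, ih]
    · have h1 : (a.1 == k) = false := by simp [ha]
      by_cases haq : a.1 = q
      · have h2 : (a.1 == q) = true := by simp [haq]
        simp [h1, h2]
      · have h2 : (a.1 == q) = false := by simp [haq]
        simp [h1, h2, ih]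

theorem pv_get?_erase_self {κ ν : Type} [BEq κ] [LawfulBEq κ] (d : PySem.Dict κ ν) (k : κ) :
    (d.erase k).get? k = none := by
  simp only [PySem.Dict.erase, PySem.Dict.get?]
  rw [List.find?_eq_none.mpr]
  · rfl
  · intro p hp
    have := List.of_mem_filter hp
    simpa using this

theorem pv_get?_erase_of_ne {κ ν : Type} [BEq κ] [LawfulBEq κ] (d : PySem.Dict κ ν) (k q : κ)
    (h : q ≠ k) : (d.erase k).get? q = d.get? q := by
  simp only [PySem.Dict.erase, PySem.Dict.get?]
  rw [pv_find?_filter_ne _ _ _ h]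

theorem pv_keys_erase_sublist {κ ν : Type} [BEq κ] (d : PySem.Dict κ ν) (k : κ) :
    (d.erase k).keys.Sublist d.keys := by
  simp only [PySem.Dict.erase, PySem.Dict.keys]
  exact List.Sublist.map _ List.filter_sublist

theorem pv_size_eq_keys_length {κ ν : Type} (d : PySem.Dict κ ν) : d.size = d.keys.length := by
  simp [PySem.Dict.size, PySem.Dict.keys]

-- dict whose get? is characterised by a positive residual count has size = that countP
theorem pv_size_eq (cs W : List Int) (dd : PySem.Dict Int Int)
    (hchar : ∀ x : Int, dd.get? x =
      if 0 < cs.count x - W.count x then some ((cs.count x - W.count x : Nat) : Int) else none)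
    (hnd : dd.keys.Nodup) :
    dd.size = (PySem.Set.ofList cs).countP (fun x => decide (0 < cs.count x - W.count x)) := by
  rw [pv_size_eq_keys_length, List.countP_eq_length_filter]
  have hmem : ∀ x : Int, x ∈ dd.keys ↔ 0 < cs.count x - W.count x := by
    intro x
    constructor
    · intro hx
      by_contra hpos
      have := (PySem.Dict.get?_eq_none_iff_not_mem_keys dd x).mpr
      have h2 := hchar x
      rw [if_neg hpos] at h2
      exact ((PySem.Dict.get?_eq_none_iff_not_mem_keys dd x).mp h2) hx
    · intro hpos
      by_contra hx
      have h2 := (PySem.Dict.get?_eq_none_iff_not_mem_keys dd x).mpr hx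
      rw [hchar x, if_pos hpos] at h2
      simp at h2
  have hperm : dd.keys.Perm ((PySem.Set.ofList cs).filter (fun x => decide (0 < cs.count x - W.count x))) := by
    rw [List.perm_ext_iff_of_nodup hnd ((PySem.Set.nodup_ofList cs).filter _)]
    intro a
    rw [List.mem_filter, hmem, PySem.Set.mem_ofList]
    constructor
    · intro h
      refine ⟨?_, by simpa using h⟩
      have : a ∈ cs := by
        by_contra hac
        have : cs.count a = 0 := by simp [List.count_eq_zero, hac]
        omega
      exact this
    · rintro ⟨_, h⟩; simpa using h
  rw [hperm.length_eq]

-- ---- occurrence-index characterisations ----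
theorem pv_idxOf_le_of_getElem (cs : List Int) (x : Int) (j : Nat) (hj : j < cs.length)
    (he : cs[j] = x) : cs.idxOf x ≤ j := by
  induction cs generalizing j with
  | nil => simp at hj
  | cons a t ih =>
    by_cases hax : a = x
    · simp [hax]
    · cases j with
      | zero => simp at he; exact absurd he hax
      | succ j' =>
        have h1 : (a == x) = false := by simp [hax]
        simp only [List.idxOf_cons, h1, cond_false]
        have := ih j' (by simpa using hj) (by simpa using he)
        omega

theorem pv_mem_take_iff (cs : List Int) (x : Int) (s : Nat) :
    x ∈ cs.take s ↔ x ∈ cs ∧ cs.idxOf x < s := by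
  constructor
  · intro h
    have hx : x ∈ cs := List.mem_of_mem_take h
    refine ⟨hx, ?_⟩
    obtain ⟨j, hj, he⟩ := List.getElem_of_mem h
    have hj2 := hj
    simp only [List.length_take, lt_min_iff] at hj2
    rw [List.getElem_take] at he
    have := pv_idxOf_le_of_getElem cs x j hj2.2 he
    omega
  · rintro ⟨hx, hlt⟩
    have hidx : cs.idxOf x < cs.length := List.idxOf_lt_length_iff.mpr hx
    have he : cs[cs.idxOf x] = x := List.getElem_idxOf hidx
    have hlen : cs.idxOf x < (cs.take s).length := by simp [List.length_take]; omega
    have : (cs.take s)[cs.idxOf x] = x := by rw [List.getElem_take]; exact he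
    exact this ▸ List.getElem_mem hlen

theorem pv_mem_drop_iff (cs : List Int) (x : Int) (t : Nat) (ht : t ≤ cs.length) :
    x ∈ cs.drop t ↔ x ∈ cs ∧ t ≤ pvLIdx cs x := by
  have hrw : (x ∈ cs.drop t) ↔ x ∈ List.take (cs.length - t) cs.reverse := by
    rw [List.take_reverse]
    have h1 : cs.length - (cs.length - t) = t := by omega
    rw [h1, List.mem_reverse]
  rw [hrw, pv_mem_take_iff]
  unfold pvLIdx
  constructor
  · rintro ⟨hx, hlt⟩
    have hxc : x ∈ cs := List.mem_reverse.mp hx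
    have h2 : cs.reverse.idxOf x < cs.length := by
      have := List.idxOf_lt_length_iff.mpr hx; simpa using this
    exact ⟨hxc, by omega⟩
  · rintro ⟨hx, hle⟩
    have hx' : x ∈ cs.reverse := List.mem_reverse.mpr hx
    have h2 : cs.reverse.idxOf x < cs.length := by
      have := List.idxOf_lt_length_iff.mpr hx'; simpa using this
    exact ⟨hx', by omega⟩

theorem pv_count_window (cs : List Int) (s K : Nat) (x : Int) (h : s + K ≤ cs.length) :
    cs.count x = (cs.take s).count x + ((cs.take (s + K)).drop s).count x
      + (cs.drop (s + K)).count x := by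
  have h1 : cs.take s ++ (cs.take (s + K)).drop s = cs.take (s + K) := by
    have h2 := List.take_append_drop s (cs.take (s + K))
    rwa [List.take_take, min_eq_left (by omega)] at h2
  have h2 : cs.count x = (cs.take (s + K)).count x + (cs.drop (s + K)).count x := by
    conv_lhs => rw [← List.take_append_drop (s + K) cs]
    rw [List.count_append]
  have h3 : (cs.take (s + K)).count x
      = (cs.take s).count x + ((cs.take (s + K)).drop s).count x := by
    conv_lhs => rw [← h1]
    rw [List.count_append]
  omega

theorem pv_resid_zero_iff (cs : List Int) (s K : Nat) (x : Int) (hx : x ∈ cs)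
    (h : s + K ≤ cs.length) :
    (cs.count x - ((cs.take (s + K)).drop s).count x = 0) ↔
      (s ≤ pvFIdx cs x ∧ pvLIdx cs x + 1 ≤ s + K) := by
  have hw := pv_count_window cs s K x h
  have h1 : ((cs.take s).count x = 0) ↔ s ≤ pvFIdx cs x := by
    rw [List.count_eq_zero]
    unfold pvFIdx
    rw [pv_mem_take_iff]
    simp [hx]
  have h2 : ((cs.drop (s + K)).count x = 0) ↔ pvLIdx cs x + 1 ≤ s + K := by
    rw [List.count_eq_zero, pv_mem_drop_iff cs x (s + K) h]
    simp [hx]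
  omega

-- ---- port A as a structural fold over List.range ----
def pvStepA (cs : List Int) (k : Int) (st : PySem.Dict Int Int × Int) (i : Int) :
    PySem.Dict Int Int × Int :=
  let cc := st.1
  let mx := st.2
  let x := PySem.List.pyGetD cs i 0
  let cc := cc.modify x 0 (· - 1)
  let cc := if cc.getD x 0 = 0 then cc.erase x else cc
  if i ≥ k - 1 then
    let mx := max mx (cc.size : Int)
    let y := PySem.List.pyGetD cs (i - k + 1) 0
    (cc.modify y 0 (· + 1), mx)
  else (cc, mx)

theorem pv_shareCandies_eq (cs : List Int) (k : Int) (hk : ¬ k = 0) :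
    shareCandies cs k =
      (((List.range cs.length).map (fun i : Nat => (i : Int))).foldl (pvStepA cs k)
        (PySem.Dict.counter cs, 0)).2 := by
  simp only [shareCandies, if_neg hk, PySem.List.pyRange_zero_natCast]
  rfl

def pvInvA (cs : List Int) (k : Int) (i : Nat) (st : PySem.Dict Int Int × Int) : Prop :=
  (∀ x : Int, st.1.get? x =
    if 0 < pvResid cs k.toNat i x then some ((pvResid cs k.toNat i x : Nat) : Int) else none)
  ∧ st.1.keys.Nodup
  ∧ st.2 = ((List.range (i + 1 - k.toNat)).map
      (fun s => (pvD cs : Int) - (pvInside cs k.toNat s : Int))).foldl max 0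

theorem pv_get?_counter (cs : List Int) (x : Int) :
    (PySem.Dict.counter cs).get? x =
      if 0 < cs.count x then some ((cs.count x : Nat) : Int) else none := by
  by_cases hx : x ∈ cs
  · have hc : (PySem.Dict.counter cs).contains x = true := by
      rw [PySem.Dict.contains_counter]; simpa using hx
    rw [pv_get?_eq_some_of_contains _ _ (0 : Int) hc, PySem.Dict.getD_counter]
    have : 0 < cs.count x := List.count_pos_iff.mpr hx
    simp [this]
  · have hc : (PySem.Dict.counter cs).contains x = false := by
      rw [PySem.Dict.contains_counter]; simpa using hx
    rw [pv_get?_eq_none_of_not_contains _ _ hc]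
    have : cs.count x = 0 := by simp [List.count_eq_zero, hx]
    simp [this]

theorem pv_invA_zero (cs : List Int) (k : Int) (hk : 1 ≤ k) :
    pvInvA cs k 0 (PySem.Dict.counter cs, 0) := by
  refine ⟨?_, PySem.Dict.nodup_keys_counter cs, ?_⟩
  · intro x
    have hwin : pvWin cs k.toNat 0 = [] := by simp [pvWin]
    have : pvResid cs k.toNat 0 x = cs.count x := by simp [pvResid, hwin]
    rw [this]
    exact pv_get?_counter cs x
  · have : 0 + 1 - k.toNat = 0 := by omega
    simp [this]

theorem pv_size_window (cs : List Int) (K s : Nat) (dd : PySem.Dict Int Int)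
    (hchar : ∀ z : Int, dd.get? z =
      if 0 < cs.count z - ((cs.take (s + K)).drop s).count z
      then some ((cs.count z - ((cs.take (s + K)).drop s).count z : Nat) : Int) else none)
    (hnd : dd.keys.Nodup) (hsn : s + K ≤ cs.length) :
    dd.size = pvD cs - pvInside cs K s ∧ pvInside cs K s ≤ pvD cs := by
  have h1 := pv_size_eq cs ((cs.take (s + K)).drop s) dd hchar hnd
  have h2 := List.length_eq_countP_add_countP
    (fun z => decide (0 < cs.count z - ((cs.take (s + K)).drop s).count z))
    (l := PySem.Set.ofList cs)
  have h3 : (PySem.Set.ofList cs).countP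
      (fun z => decide ¬ (decide (0 < cs.count z - ((cs.take (s + K)).drop s).count z) = true))
      = pvInside cs K s := by
    unfold pvInside
    apply List.countP_congr
    intro z hz
    have hzc : z ∈ cs := (PySem.Set.mem_ofList cs z).mp hz
    have hiff := pv_resid_zero_iff cs s K z hzc hsn
    simp only [decide_eq_true_eq, Bool.and_eq_true]
    omega
  have h4 : pvInside cs K s ≤ pvD cs := by
    unfold pvInside pvD
    exact List.countP_le_length
  refine ⟨?_, h4⟩
  unfold pvD at *
  omega

theorem pv_stepA_inv (cs : List Int) (k : Int) (hk : 1 ≤ k) (i : Nat) (hi : i < cs.length)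
    (st : PySem.Dict Int Int × Int) (h : pvInvA cs k i st) :
    pvInvA cs k (i + 1) (pvStepA cs k st (i : Int)) := by
  obtain ⟨hchar, hnd, hmx⟩ := h
  have hKk : (k.toNat : Int) = k := Int.toNat_of_nonneg (by omega)
  have hK1 : 1 ≤ k.toNat := by omega
  have hx : PySem.List.pyGetD cs ((i : Nat) : Int) 0 = cs[i] := by
    rw [PySem.List.pyGetD_natCast]
    exact List.getD_eq_getElem cs 0 hi
  have htake1 : cs.take (i + 1) = cs.take i ++ [cs[i]] := by
    rw [← List.take_concat_get hi, List.concat_eq_append]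
  have hW1 : (cs.take (i + 1)).drop (i - (k.toNat - 1)) = pvWin cs k.toNat i ++ [cs[i]] := by
    rw [htake1, List.drop_append_of_le_length (by simp [List.length_take]; omega)]
    rfl
  have hsubW1 : ((cs.take (i + 1)).drop (i - (k.toNat - 1))).Sublist cs :=
    (List.drop_sublist _ _).trans (List.take_sublist _ _)
  have hcntW : ∀ z : Int, (pvWin cs k.toNat i).count z ≤ cs.count z := by
    intro z
    have hsub : (pvWin cs k.toNat i).Sublist cs := by
      unfold pvWin
      exact (List.drop_sublist _ _).trans (List.take_sublist _ _)
    exact hsub.count_le z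
  have hrpos : 1 ≤ pvResid cs k.toNat i cs[i] := by
    unfold pvResid pvWin
    have h1 : ((cs.take i).drop (i - (k.toNat - 1))).count cs[i] ≤ (cs.take i).count cs[i] :=
      (List.drop_sublist _ _).count_le _
    have h2 : ∀ y : Int, cs.count y = (cs.take i).count y + (cs.drop i).count y := by
      intro y
      conv_lhs => rw [← List.take_append_drop i cs]
      rw [List.count_append]
    have h2' := h2 cs[i]
    have h3 : 0 < (cs.drop i).count cs[i] := by
      rw [List.drop_eq_getElem_cons hi, List.count_cons]
      simp
    omega
  have hr1 : ∀ z : Int,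
      cs.count z - ((cs.take (i + 1)).drop (i - (k.toNat - 1))).count z
        = pvResid cs k.toNat i z - (if z = cs[i] then 1 else 0) := by
    intro z
    have e1 : ((cs.take (i + 1)).drop (i - (k.toNat - 1))).count z
        = (pvWin cs k.toNat i).count z + (if z = cs[i] then 1 else 0) := by
      rw [hW1, List.count_append, List.count_singleton]
      by_cases hz : z = cs[i]
      · simp [hz]
      · have hne : (cs[i] == z) = false := by simp; intro hh; exact hz hh.symm
        simp [hz, hne]
    unfold pvResid
    rw [e1]
    have := hcntW z
    by_cases hz : z = cs[i]
    · have := hrpos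
      unfold pvResid at this
      simp only [hz] at *
      omega
    · simp only [hz, if_false]
      omega
  -- dict state after the decrement
  have hgetD0 : st.1.getD cs[i] 0 = ((pvResid cs k.toNat i cs[i] : Nat) : Int) := by
    rw [PySem.Dict.getD_eq_get?_getD, hchar cs[i], if_pos (by omega)]
    rfl
  have hchar1self : (st.1.modify cs[i] 0 (· - 1)).get? cs[i]
      = some (((pvResid cs k.toNat i cs[i] : Nat) : Int) - 1) := by
    rw [pv_get?_modify_self, hgetD0]
  have hchar1ne : ∀ z : Int, z ≠ cs[i] →
      (st.1.modify cs[i] 0 (· - 1)).get? z = st.1.get? z := by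
    intro z hz
    exact pv_get?_modify_of_ne _ _ _ _ _ hz
  have hnd1 : (st.1.modify cs[i] 0 (· - 1)).keys.Nodup := by
    rw [PySem.Dict.keys_modify]
    exact PySem.Dict.nodup_keys_insert _ _ _ hnd
  have hgD1 : (st.1.modify cs[i] 0 (· - 1)).getD cs[i] 0
      = ((pvResid cs k.toNat i cs[i] : Nat) : Int) - 1 := by
    rw [PySem.Dict.getD_eq_get?_getD, hchar1self]
    rfl
  simp only [pvStepA, hx]
  set dd2 := if (st.1.modify cs[i] 0 (· - 1)).getD cs[i] 0 = 0
    then (st.1.modify cs[i] 0 (· - 1)).erase cs[i]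
    else st.1.modify cs[i] 0 (· - 1) with hdd2
  have hchar2 : ∀ z : Int, dd2.get? z =
      if 0 < cs.count z - ((cs.take (i + 1)).drop (i - (k.toNat - 1))).count z
      then some ((cs.count z - ((cs.take (i + 1)).drop (i - (k.toNat - 1))).count z : Nat) : Int)
      else none := by
    intro z
    rw [hr1 z, hdd2]
    by_cases hz : z = cs[i]
    · by_cases h1 : pvResid cs k.toNat i cs[i] = 1
      · rw [if_pos (by rw [hgD1, h1]; simp)]
        rw [hz, pv_get?_erase_self, if_neg (by simp [hz, h1])]
      · rw [if_neg (by rw [hgD1]; intro hc; omega)]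
        rw [hz, hchar1self, if_pos (by simp [hz]; omega)]
        rw [if_pos rfl]
        congr 1
        omega
    · have hres : pvResid cs k.toNat i z - (if z = cs[i] then 1 else 0)
          = pvResid cs k.toNat i z := by simp [hz]
      rw [hres]
      by_cases hc : (st.1.modify cs[i] 0 (· - 1)).getD cs[i] 0 = 0
      · rw [if_pos hc, pv_get?_erase_of_ne _ _ _ hz, hchar1ne z hz, hchar z]
      · rw [if_neg hc, hchar1ne z hz, hchar z]
  have hnd2 : dd2.keys.Nodup := by
    rw [hdd2]
    split
    · exact List.Nodup.sublist (pv_keys_erase_sublist _ _) hnd1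
    · exact hnd1
  by_cases hrec : ((i : Nat) : Int) ≥ k - 1
  · rw [if_pos hrec]
    have hsK : k.toNat ≤ i + 1 := by omega
    have hsn : i + 1 - k.toNat < cs.length := by omega
    have hyidx : ((i : Nat) : Int) - k + 1 = ((i + 1 - k.toNat : Nat) : Int) := by omega
    have hy : PySem.List.pyGetD cs (((i : Nat) : Int) - k + 1) 0 = cs[i + 1 - k.toNat] := by
      rw [hyidx, PySem.List.pyGetD_natCast]
      exact List.getD_eq_getElem cs 0 hsn
    rw [hy]
    have hidrop : i - (k.toNat - 1) = i + 1 - k.toNat := by omega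
    have hsK2 : (i + 1 - k.toNat) + k.toNat = i + 1 := by omega
    have hchar2' : ∀ z : Int, dd2.get? z =
        if 0 < cs.count z - ((cs.take ((i + 1 - k.toNat) + k.toNat)).drop (i + 1 - k.toNat)).count z
        then some ((cs.count z -
            ((cs.take ((i + 1 - k.toNat) + k.toNat)).drop (i + 1 - k.toNat)).count z : Nat) : Int)
        else none := by
      intro z
      rw [hsK2, ← hidrop]
      exact hchar2 z
    have hsize := pv_size_window cs k.toNat (i + 1 - k.toNat) dd2 hchar2' hnd2 (by omega)
    have hwin' : pvWin cs k.toNat (i + 1) = (cs.take (i + 1)).drop ((i + 1 - k.toNat) + 1) := by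
      unfold pvWin
      congr 1
      omega
    have hlt : i + 1 - k.toNat < (cs.take (i + 1)).length := by
      simp [List.length_take]
      omega
    have hconsW : (cs.take (i + 1)).drop (i + 1 - k.toNat)
        = cs[i + 1 - k.toNat] :: (cs.take (i + 1)).drop ((i + 1 - k.toNat) + 1) := by
      rw [List.drop_eq_getElem_cons hlt, List.getElem_take]
    have hsubW2 : ((cs.take (i + 1)).drop (i + 1 - k.toNat)).Sublist cs :=
      (List.drop_sublist _ _).trans (List.take_sublist _ _)
    have hr2 : ∀ w : Int, pvResid cs k.toNat (i + 1) w
        = (cs.count w - ((cs.take (i + 1)).drop (i - (k.toNat - 1))).count w)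
          + (if w = cs[i + 1 - k.toNat] then 1 else 0) := by
      intro w
      unfold pvResid
      rw [hwin', hidrop]
      have e1 : ((cs.take (i + 1)).drop (i + 1 - k.toNat)).count w
          = ((cs.take (i + 1)).drop ((i + 1 - k.toNat) + 1)).count w
            + (if w = cs[i + 1 - k.toNat] then 1 else 0) := by
        rw [hconsW, List.count_cons]
        by_cases hw : w = cs[i + 1 - k.toNat]
        · simp [hw]
        · have hne : (cs[i + 1 - k.toNat] == w) = false := by
            simp
            intro hh
            exact hw hh.symm
          simp [hw, hne]
      have hb := hsubW2.count_le w
      rw [e1] at hb ⊢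
      omega
    refine ⟨?_, ?_, ?_⟩
    · intro z
      show (dd2.modify cs[i + 1 - k.toNat] 0 (· + 1)).get? z = _
      have hgdd2 : dd2.getD cs[i + 1 - k.toNat] 0
          = ((cs.count cs[i + 1 - k.toNat] -
              ((cs.take (i + 1)).drop (i - (k.toNat - 1))).count cs[i + 1 - k.toNat] : Nat) : Int) := by
        rw [PySem.Dict.getD_eq_get?_getD, hchar2 cs[i + 1 - k.toNat]]
        by_cases hp : 0 < cs.count cs[i + 1 - k.toNat] -
            ((cs.take (i + 1)).drop (i - (k.toNat - 1))).count cs[i + 1 - k.toNat]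
        · rw [if_pos hp]
          rfl
        · rw [if_neg hp]
          have : cs.count cs[i + 1 - k.toNat] -
              ((cs.take (i + 1)).drop (i - (k.toNat - 1))).count cs[i + 1 - k.toNat] = 0 := by omega
          rw [this]
          rfl
      by_cases hzy : z = cs[i + 1 - k.toNat]
      · rw [hzy, pv_get?_modify_self, hgdd2, hr2 cs[i + 1 - k.toNat]]
        have hind : (if cs[i + 1 - k.toNat] = cs[i + 1 - k.toNat] then (1 : Nat) else 0) = 1 := by
          simp
        rw [hind, if_pos (by omega)]
        congr 1
      · rw [pv_get?_modify_of_ne _ _ _ _ _ hzy, hchar2 z, hr2 z]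
        simp [hzy]
    · show (dd2.modify cs[i + 1 - k.toNat] 0 (· + 1)).keys.Nodup
      rw [PySem.Dict.keys_modify]
      exact PySem.Dict.nodup_keys_insert _ _ _ hnd2
    · show max st.2 (dd2.size : Int) = _
      rw [hmx, hsize.1]
      have hrange : (i + 1) + 1 - k.toNat = (i + 1 - k.toNat) + 1 := by omega
      rw [hrange, List.range_succ, List.map_append, List.foldl_append, List.map_cons,
        List.map_nil, List.foldl_cons, List.foldl_nil]
      congr 1
      have := hsize.2
      push_cast [Nat.cast_sub this]
      ring
  · rw [if_neg hrec]
    refine ⟨?_, hnd2, ?_⟩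
    · intro z
      have hwin' : pvWin cs k.toNat (i + 1) = (cs.take (i + 1)).drop (i - (k.toNat - 1)) := by
        unfold pvWin
        congr 1
        omega
      show dd2.get? z = _
      unfold pvResid
      rw [hwin']
      exact hchar2 z
    · show st.2 = _
      rw [hmx]
      have h1 : i + 1 - k.toNat = 0 := by omega
      have h2 : (i + 1) + 1 - k.toNat = 0 := by omega
      rw [h1, h2]

theorem pv_A_eq_ref (cs : List Int) (k : Int) (hk : 1 ≤ k) :
    shareCandies cs k = pvRef cs k.toNat := by
  have hfold : ∀ m, m ≤ cs.length →
      pvInvA cs k m (((List.range m).map (fun i : Nat => (i : Int))).foldl (pvStepA cs k)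
        (PySem.Dict.counter cs, 0)) := by
    intro m
    induction m with
    | zero => intro _; simpa using pv_invA_zero cs k hk
    | succ m ih =>
      intro hm
      rw [List.range_succ, List.map_append, List.foldl_append, List.map_cons, List.map_nil,
        List.foldl_cons, List.foldl_nil]
      exact pv_stepA_inv cs k hk m (by omega) _ (ih (by omega))
  rw [pv_shareCandies_eq cs k (by omega)]
  exact (hfold cs.length le_rfl).2.2

-- ---- port B: dict-comprehension characterisation ----
theorem pv_enum_append (l : List Int) (a : Int) (st : Int) :
    PySem.List.enumerate (l ++ [a]) st = PySem.List.enumerate l st ++ [(st + l.length, a)] := by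
  induction l generalizing st with
  | nil => simp [PySem.List.enumerate]
  | cons b t ih =>
    have h1 : st + 1 + (t.length : Int) = st + ((t.length + 1 : Nat) : Int) := by push_cast; ring
    simp only [List.cons_append, PySem.List.enumerate, ih, List.length_cons, h1]

theorem pv_enum_map_snd (l : List Int) (st : Int) :
    (PySem.List.enumerate l st).map (fun p => p.2) = l := by
  induction l generalizing st with
  | nil => rfl
  | cons b t ih => simp [PySem.List.enumerate, ih]

theorem pv_ins_enum_get? (cs : List Int) (val : Int → Int) (q : Int) :
    ((PySem.List.enumerate cs).foldl
        (fun (d : PySem.Dict Int Int) p => d.insert p.2 (val p.1)) PySem.Dict.empty).get? q =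
      if q ∈ cs then some (val ((pvLIdx cs q : Nat) : Int)) else none := by
  induction cs using List.reverseRecOn with
  | nil => simp [PySem.List.enumerate, PySem.Dict.get?_empty]
  | append_singleton l a ih =>
    rw [pv_enum_append, List.foldl_append, List.foldl_cons, List.foldl_nil]
    rw [PySem.Dict.get?_insert]
    by_cases hqa : q = a
    · subst hqa
      have hL : pvLIdx (l ++ [q]) q = l.length := by
        unfold pvLIdx
        simp [List.reverse_append]
      simp [hL]
    · rw [if_neg hqa, ih]
      by_cases hql : q ∈ l
      · have hL : pvLIdx (l ++ [a]) q = pvLIdx l q := by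
          unfold pvLIdx
          have h1 : (a == q) = false := by simp; intro hh; exact hqa hh.symm
          have h2 : l.reverse.idxOf q < l.length := by
            have := List.idxOf_lt_length_iff.mpr (List.mem_reverse.mpr hql)
            simpa using this
          simp [List.reverse_append, List.idxOf_cons, h1]
          omega
        simp [hql, hqa, hL]
      · have : ¬ q ∈ l ++ [a] := by simp [hql, hqa]
        simp [hql, this]

def pvLastD (cs : List Int) : PySem.Dict Int Int :=
  (PySem.List.enumerate cs).foldl (fun d p => d.insert p.2 p.1) PySem.Dict.empty
def pvFirstD (cs : List Int) : PySem.Dict Int Int :=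
  (PySem.List.enumerate cs.reverse).foldl
    (fun d p => d.insert p.2 ((cs.length : Int) - 1 - p.1)) PySem.Dict.empty

theorem pv_last_get? (cs : List Int) (q : Int) :
    (pvLastD cs).get? q = if q ∈ cs then some ((pvLIdx cs q : Nat) : Int) else none := by
  have := pv_ins_enum_get? cs (fun j => j) q
  simpa [pvLastD] using this

theorem pv_first_get? (cs : List Int) (q : Int) :
    (pvFirstD cs).get? q = if q ∈ cs then some ((pvFIdx cs q : Nat) : Int) else none := by
  have h := pv_ins_enum_get? cs.reverse (fun j => (cs.length : Int) - 1 - j) q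
  have hrw : (PySem.List.enumerate cs.reverse).foldl
      (fun (d : PySem.Dict Int Int) p => d.insert p.2 ((cs.length : Int) - 1 - p.1))
      PySem.Dict.empty = pvFirstD cs := rfl
  rw [hrw] at h
  rw [h]
  by_cases hq : q ∈ cs
  · have hq' : q ∈ cs.reverse := List.mem_reverse.mpr hq
    rw [if_pos hq', if_pos hq]
    have hL : pvLIdx cs.reverse q = cs.length - 1 - cs.idxOf q := by
      unfold pvLIdx
      simp
    have hidx : cs.idxOf q < cs.length := List.idxOf_lt_length_iff.mpr hq
    rw [hL]
    congr 1
    unfold pvFIdx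
    omega
  · rw [if_neg (by simpa using hq), if_neg hq]

theorem pv_keys_ins_enum (cs : List Int) (val : Int → Int) :
    ((PySem.List.enumerate cs).foldl
        (fun (d : PySem.Dict Int Int) p => d.insert p.2 (val p.1)) PySem.Dict.empty).keys =
      PySem.Set.ofList cs := by
  have h := PySem.Dict.keys_foldl_insert_key (PySem.List.enumerate cs)
    (fun (p : Int × Int) => p.2) (fun _ p => val p.1) (PySem.Dict.empty (κ := Int) (ν := Int))
  rw [h, PySem.Dict.keys_empty, pv_enum_map_snd]
  rw [PySem.Set.ofList_eq_foldl]
  rfl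

theorem pv_nodup_ins_enum (cs : List Int) (val : Int → Int) :
    ((PySem.List.enumerate cs).foldl
        (fun (d : PySem.Dict Int Int) p => d.insert p.2 (val p.1)) PySem.Dict.empty).keys.Nodup := by
  rw [pv_keys_ins_enum]
  exact PySem.Set.nodup_ofList cs

theorem pv_last_size (cs : List Int) : (pvLastD cs).size = pvD cs := by
  rw [pv_size_eq_keys_length]
  have : (pvLastD cs).keys = PySem.Set.ofList cs := pv_keys_ins_enum cs (fun j => j)
  rw [this]; rfl

-- ---- the difference array ----
def pvLoI (cs : List Int) (k : Int) (q : Int) : Int :=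
  if ((pvLIdx cs q : Nat) : Int) - k + 1 < 0 then 0 else ((pvLIdx cs q : Nat) : Int) - k + 1
def pvHiI (cs : List Int) (k : Int) (q : Int) : Int :=
  if ((pvFIdx cs q : Nat) : Int) < (cs.length : Int) - k then ((pvFIdx cs q : Nat) : Int)
  else (cs.length : Int) - k
def pvCoverF (cs : List Int) (k : Int) (cover : List Int) (q : Int) : List Int :=
  if pvLoI cs k q ≤ pvHiI cs k q then
    PySem.List.pySetD
      (PySem.List.pySetD cover (pvLoI cs k q) (PySem.List.pyGetD cover (pvLoI cs k q) 0 + 1))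
      (pvHiI cs k q + 1)
      (PySem.List.pyGetD
        (PySem.List.pySetD cover (pvLoI cs k q) (PySem.List.pyGetD cover (pvLoI cs k q) 0 + 1))
        (pvHiI cs k q + 1) 0 - 1)
  else cover

theorem pv_sum_take_bump (l : List Int) (j : Int) (hj0 : 0 ≤ j) (hjl : j < (l.length : Int))
    (c : Int) (t : Nat) :
    ((PySem.List.pySetD l j (PySem.List.pyGetD l j 0 + c)).take (t + 1)).sum =
      (l.take (t + 1)).sum + (if j ≤ (t : Int) then c else 0) := by
  rw [PySem.List.pySetD_of_nonneg l _ hj0, PySem.List.pyGetD_of_nonneg l 0 hj0]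
  have hjlen : j.toNat < l.length := by omega
  rw [List.getD_eq_getElem l 0 hjlen, List.take_set]
  by_cases hjt : j.toNat ≤ t
  · have hlt : j.toNat < (l.take (t + 1)).length := by
      simp [List.length_take]; omega
    have hget : (l.take (t + 1))[j.toNat] = l[j.toNat] := List.getElem_take
    have h1 := List.sum_set (l.take (t + 1)) j.toNat (l[j.toNat] + c)
    have h2 : (l.take (t + 1)).sum = ((l.take (t + 1)).take j.toNat).sum + l[j.toNat]
        + ((l.take (t + 1)).drop (j.toNat + 1)).sum := by
      conv_lhs => rw [← List.take_append_drop j.toNat (l.take (t + 1))]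
      rw [List.sum_append, List.drop_eq_getElem_cons hlt, List.sum_cons, hget]
      ring
    rw [h1, if_pos hlt, if_pos (by omega)]
    omega
  · rw [List.set_eq_of_length_le (by simp [List.length_take]; omega), if_neg (by omega)]
    ring

theorem pv_length_coverF (cs : List Int) (k : Int) (cover : List Int) (q : Int) :
    (pvCoverF cs k cover q).length = cover.length := by
  unfold pvCoverF
  split
  · rw [PySem.List.length_pySetD, PySem.List.length_pySetD]
  · rfl

theorem pv_cover_sum (cs : List Int) (k : Int) (hk : 1 ≤ k) (hkn : k ≤ (cs.length : Int))
    (t : Nat) (ht : (t : Int) ≤ (cs.length : Int) - k) :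
    ∀ (xs : List Int) (cover : List Int), (∀ q ∈ xs, q ∈ cs) →
      cover.length = cs.length + 2 - k.toNat →
      ((xs.foldl (pvCoverF cs k) cover).take (t + 1)).sum =
        (cover.take (t + 1)).sum +
          (xs.countP (fun q => decide (pvLoI cs k q ≤ (t : Int) ∧ (t : Int) ≤ pvHiI cs k q)) : Int) := by
  intro xs
  induction xs with
  | nil => intro cover _ _; simp
  | cons q rest ih =>
    intro cover hq hlen
    rw [List.foldl_cons, List.countP_cons,
      ih _ (fun z hz => hq z (List.mem_cons_of_mem _ hz)) (by rw [pv_length_coverF]; exact hlen)]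
    have hq0 : q ∈ cs := hq q List.mem_cons_self
    have key : ((pvCoverF cs k cover q).take (t + 1)).sum =
        (cover.take (t + 1)).sum +
          (if (pvLoI cs k q ≤ (t : Int) ∧ (t : Int) ≤ pvHiI cs k q) then 1 else 0) := by
      unfold pvCoverF
      by_cases hg : pvLoI cs k q ≤ pvHiI cs k q
      · rw [if_pos hg]
        have hlo0 : 0 ≤ pvLoI cs k q := by unfold pvLoI; split <;> omega
        have hhi : pvHiI cs k q ≤ (cs.length : Int) - k := by unfold pvHiI; split <;> omega
        have hlenI : (cover.length : Int) = (cs.length : Int) - k + 2 := by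
          rw [hlen]; omega
        rw [show (PySem.List.pyGetD
              (PySem.List.pySetD cover (pvLoI cs k q)
                (PySem.List.pyGetD cover (pvLoI cs k q) 0 + 1)) (pvHiI cs k q + 1) 0 - 1)
            = (PySem.List.pyGetD
              (PySem.List.pySetD cover (pvLoI cs k q)
                (PySem.List.pyGetD cover (pvLoI cs k q) 0 + 1)) (pvHiI cs k q + 1) 0 + (-1))
          from by ring]
        rw [pv_sum_take_bump _ _ (by omega) (by rw [PySem.List.length_pySetD]; omega) (-1) t,
          pv_sum_take_bump cover _ hlo0 (by omega) 1 t]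
        by_cases hin : pvLoI cs k q ≤ (t : Int) ∧ (t : Int) ≤ pvHiI cs k q
        · rw [if_pos hin, if_pos hin.1, if_neg (by omega)]
          ring
        · rw [if_neg hin]
          by_cases h1 : pvLoI cs k q ≤ (t : Int)
          · rw [if_pos h1, if_pos (by omega)]
            ring
          · rw [if_neg h1, if_neg (by omega)]
            ring
      · rw [if_neg hg, if_neg (by rintro ⟨h1, h2⟩; exact hg (by omega))]
        simp
    rw [key]
    by_cases hin : pvLoI cs k q ≤ (t : Int) ∧ (t : Int) ≤ pvHiI cs k q
    · rw [if_pos hin, decide_eq_true hin, if_pos rfl]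
      push_cast
      ring
    · rw [if_neg hin, decide_eq_false hin, if_neg (by simp)]
      push_cast
      ring

-- ---- final scan ----
theorem pv_scan (cs : List Int) (k : Int) (hk : 1 ≤ k) (hkn : k ≤ (cs.length : Int))
    (cover' : List Int) (hlen : cover'.length = cs.length + 2 - k.toNat)
    (hsum : ∀ t : Nat, t ≤ cs.length - k.toNat →
      (cover'.take (t + 1)).sum = (pvInside cs k.toNat t : Int)) :
    ∀ m, m ≤ cs.length - k.toNat + 1 →
      ((List.range m).foldl
          (fun (st : Int × Int) (s : Nat) =>
            ((if st.2 + PySem.List.pyGetD cover' (s : Int) 0 < st.1 then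
                st.2 + PySem.List.pyGetD cover' (s : Int) 0 else st.1),
              st.2 + PySem.List.pyGetD cover' (s : Int) 0))
          ((pvD cs : Int), 0)) =
        (((List.range m).map (fun s => (pvInside cs k.toNat s : Int))).foldl min (pvD cs : Int),
          (cover'.take m).sum) := by
  intro m
  induction m with
  | zero => intro _; simp
  | succ m ih =>
    intro hm
    rw [List.range_succ, List.foldl_append, List.foldl_cons, List.foldl_nil, ih (by omega),
      List.map_append, List.foldl_append, List.map_cons, List.map_nil, List.foldl_cons,
      List.foldl_nil]
    have hmlt : m < cover'.length := by omega
    have hg : PySem.List.pyGetD cover' ((m : Nat) : Int) 0 = cover'[m] := by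
      rw [PySem.List.pyGetD_natCast]
      exact List.getD_eq_getElem cover' 0 hmlt
    rw [hg]
    have hcur : (cover'.take m).sum + cover'[m] = (cover'.take (m + 1)).sum :=
      (List.sum_take_succ cover' m hmlt).symm
    rw [hcur, hsum m (by omega)]
    have hmin : ∀ a b : Int, (if b < a then b else a) = min a b := by
      intro a b
      rw [min_def]
      split_ifs <;> omega
    rw [hmin]

theorem pv_max_min : ∀ (l : List Int) (d a : Int),
    (l.map (fun v => d - v)).foldl max (d - a) = d - l.foldl min a := by
  intro l
  induction l with
  | nil => intro d a; simp
  | cons v t ih =>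
    intro d a
    simp only [List.map_cons, List.foldl_cons]
    have : max (d - a) (d - v) = d - min a v := by omega
    rw [this, ih]

theorem pv_foldl_coverF_length (cs : List Int) (k : Int) :
    ∀ (xs : List Int) (cover : List Int), (xs.foldl (pvCoverF cs k) cover).length = cover.length := by
  intro xs
  induction xs with
  | nil => intro cover; rfl
  | cons q rest ih => intro cover; rw [List.foldl_cons, ih, pv_length_coverF]

theorem pv_countP_pred (cs : List Int) (k : Int) (hk : 1 ≤ k) (hkn : k ≤ (cs.length : Int))
    (t : Nat) (ht : t ≤ cs.length - k.toNat) :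
    (PySem.Set.ofList cs.reverse).countP
        (fun q => decide (pvLoI cs k q ≤ (t : Int) ∧ (t : Int) ≤ pvHiI cs k q))
      = pvInside cs k.toNat t := by
  have hperm : (PySem.Set.ofList cs.reverse).Perm (PySem.Set.ofList cs) := by
    rw [List.perm_ext_iff_of_nodup (PySem.Set.nodup_ofList _) (PySem.Set.nodup_ofList _)]
    intro a
    rw [PySem.Set.mem_ofList, PySem.Set.mem_ofList, List.mem_reverse]
  rw [List.Perm.countP_eq _ hperm]
  unfold pvInside
  apply List.countP_congr
  intro q hq
  have hqc : q ∈ cs := (PySem.Set.mem_ofList cs q).mp hq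
  have hKk : (k.toNat : Int) = k := Int.toNat_of_nonneg (by omega)
  have hfi : pvFIdx cs q < cs.length := List.idxOf_lt_length_iff.mpr hqc
  unfold pvLoI pvHiI
  simp only [decide_eq_true_eq, Bool.and_eq_true]
  split_ifs <;> omega

theorem pv_max_min_zero (l : List Int) (d : Int) :
    (l.map (fun v => d - v)).foldl max 0 = d - l.foldl min d := by
  have h := pv_max_min l d d
  simpa using h

theorem pv_B_eq (cs : List Int) (k : Int) (hk : 1 ≤ k) :
    shareCandies_alt cs k = pvRef cs k.toNat := by
  have hKk : (k.toNat : Int) = k := Int.toNat_of_nonneg (by omega)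
  simp only [shareCandies_alt]
  by_cases hkn : k > (cs.length : Int)
  · rw [if_neg (by omega), if_pos hkn]
    unfold pvRef
    have h0 : cs.length + 1 - k.toNat = 0 := by omega
    rw [h0]
    simp
  · rw [if_neg (by omega), if_neg hkn]
    have hKn : k.toNat ≤ cs.length := by omega
    -- identify the dicts
    have elast : (PySem.List.enumerate cs).foldl
        (fun (d : PySem.Dict Int Int) p => d.insert p.2 p.1) PySem.Dict.empty = pvLastD cs := rfl
    have efirst : (PySem.List.enumerate cs.reverse).foldl
        (fun (d : PySem.Dict Int Int) p => d.insert p.2 ((cs.length : Int) - 1 - p.1))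
        PySem.Dict.empty = pvFirstD cs := rfl
    rw [elast, efirst, pv_last_size]
    -- items of the first-occurrence dict
    have hndF : (pvFirstD cs).keys.Nodup := pv_nodup_ins_enum cs.reverse _
    have hkeysF : (pvFirstD cs).keys = PySem.Set.ofList cs.reverse := pv_keys_ins_enum cs.reverse _
    have hitems : (pvFirstD cs).items =
        (PySem.Set.ofList cs.reverse).map (fun q => (q, (pvFirstD cs).getD q 0)) := by
      rw [PySem.Dict.items_eq_map_keys _ hndF 0, hkeysF]
    rw [hitems, List.foldl_map]
    rw [PySem.List.foldl_congr_mem _ _ (pvCoverF cs k) _ (by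
      intro cover q hq
      have hqc : q ∈ cs := List.mem_reverse.mp ((PySem.Set.mem_ofList _ q).mp hq)
      have hlast : (pvLastD cs).getD q 0 = ((pvLIdx cs q : Nat) : Int) := by
        rw [PySem.Dict.getD_eq_get?_getD, pv_last_get?, if_pos hqc]
        rfl
      have hfirst : (pvFirstD cs).getD q 0 = ((pvFIdx cs q : Nat) : Int) := by
        rw [PySem.Dict.getD_eq_get?_getD, pv_first_get?, if_pos hqc]
        rfl
      simp only [pvCoverF, pvLoI, pvHiI]
      simp [hlast, hfirst])]
    set cover0 : List Int := List.replicate (((cs.length : Int) - k + 2).toNat) 0 with hcover0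
    set cover' := (PySem.Set.ofList cs.reverse).foldl (pvCoverF cs k) cover0 with hcover'
    have hlen0 : cover0.length = cs.length + 2 - k.toNat := by
      rw [hcover0, List.length_replicate]
      omega
    have hlen' : cover'.length = cs.length + 2 - k.toNat := by
      rw [hcover', pv_foldl_coverF_length]
      exact hlen0
    have hsum : ∀ t : Nat, t ≤ cs.length - k.toNat →
        (cover'.take (t + 1)).sum = (pvInside cs k.toNat t : Int) := by
      intro t ht
      rw [hcover', pv_cover_sum cs k hk (by omega) t (by omega) _ cover0
        (fun q hq => List.mem_reverse.mp ((PySem.Set.mem_ofList _ q).mp hq)) hlen0]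
      have hz : (cover0.take (t + 1)).sum = 0 := by
        rw [hcover0, List.take_replicate, List.sum_replicate]
        simp
      rw [hz, pv_countP_pred cs k hk (by omega) t ht]
      simp
    have hrange : (cs.length : Int) - k + 1 = ((cs.length - k.toNat + 1 : Nat) : Int) := by omega
    rw [hrange, PySem.List.pyRange_zero_natCast, List.foldl_map]
    rw [pv_scan cs k hk (by omega) cover' hlen' hsum (cs.length - k.toNat + 1) le_rfl]
    unfold pvRef
    have h5 : cs.length + 1 - k.toNat = cs.length - k.toNat + 1 := by omega
    rw [h5]
    have h6 : (List.range (cs.length - k.toNat + 1)).map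
          (fun s => (pvD cs : Int) - (pvInside cs k.toNat s : Int))
        = ((List.range (cs.length - k.toNat + 1)).map
            (fun s => (pvInside cs k.toNat s : Int))).map (fun v => (pvD cs : Int) - v) := by
      rw [List.map_map]
      rfl
    rw [h6, pv_max_min_zero]

theorem pv_zero_case (cs : List Int) :
    shareCandies cs 0 = shareCandies_alt cs 0 := by
  have hA : shareCandies cs 0 = ((PySem.Dict.counter cs).size : Int) := by
    simp [shareCandies]
  have hB : shareCandies_alt cs 0 = ((pvLastD cs).size : Int) := by
    simp [shareCandies_alt, pvLastD]
  rw [hA, hB, pv_last_size]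
  have : (PySem.Dict.counter cs).size = pvD cs := by
    rw [pv_size_eq_keys_length, PySem.Dict.keys_counter]; rfl
  rw [this]

theorem pv_pyGetD_replicate (m : Nat) (s : Int) :
    PySem.List.pyGetD (List.replicate m (0 : Int)) s 0 = 0 := by
  unfold PySem.List.pyGetD PySem.List.pyGet?
  cases h : PySem.List.pyIdx? (List.replicate m (0 : Int)).length s with
  | none => rfl
  | some j =>
    have hb : ((some j).bind fun n => (List.replicate m (0 : Int))[n]?)
        = (List.replicate m (0 : Int))[j]? := rfl
    rw [hb, List.getElem?_replicate]
    split <;> rfl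

theorem pv_scan_zero (cover : List Int) (hz : ∀ s : Int, PySem.List.pyGetD cover s 0 = 0) :
    ∀ (l : List Int), (l.foldl (fun (st : Int × Int) s =>
        ((if st.2 + PySem.List.pyGetD cover s 0 < st.1 then st.2 + PySem.List.pyGetD cover s 0
            else st.1),
          st.2 + PySem.List.pyGetD cover s 0)) ((0 : Int), (0 : Int))) = (0, 0) := by
  intro l
  induction l with
  | nil => rfl
  | cons a t ih =>
    rw [List.foldl_cons]
    have hstep : ((if (0 : Int) + PySem.List.pyGetD cover a 0 < (0 : Int) then
        (0 : Int) + PySem.List.pyGetD cover a 0 else (0 : Int)),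
        (0 : Int) + PySem.List.pyGetD cover a 0) = ((0 : Int), (0 : Int)) := by
      rw [hz a]
      norm_num
    rw [hstep]
    exact ih

theorem pv_empty_neg (k : Int) (hk : k < 0) :
    shareCandies [] k = shareCandies_alt [] k := by
  have hA : shareCandies [] k = 0 := by
    simp only [shareCandies]
    rw [if_neg (by omega)]
    have h0 : PySem.List.pyRange 0 ((([] : List Int).length : Nat) : Int) = [] := by
      simpa using PySem.List.pyRange_zero_natCast 0
    simp only [h0, List.foldl_nil]
  have hB : shareCandies_alt [] k = 0 := by
    simp only [shareCandies_alt]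
    rw [if_neg (by omega), if_neg (by simp; omega)]
    have he : PySem.List.enumerate ([] : List Int) = [] := rfl
    have he2 : PySem.List.enumerate (([] : List Int)).reverse = [] := rfl
    simp only [he, he2, List.foldl_nil]
    have hitems : (PySem.Dict.empty : PySem.Dict Int Int).items = [] := rfl
    simp only [hitems, List.foldl_nil]
    have hsz : (PySem.Dict.empty : PySem.Dict Int Int).size = 0 := rfl
    simp only [hsz]
    have hz : ∀ s : Int,
        PySem.List.pyGetD (List.replicate ((([] : List Int).length : Int) - k + 2).toNat (0 : Int)) s 0 = 0 :=
      fun s => pv_pyGetD_replicate _ s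
    rw [Nat.cast_zero, pv_scan_zero _ hz]
    norm_num
  rw [hA, hB]

-- ===== VERDICT (by name: the statement is the Claim_ definition above) =====
theorem shareCandies_spec : Claim_equal_shareCandies := by
  intro cs k _ hpre
  show shareCandies cs k = shareCandies_alt cs k
  rcases lt_trichotomy k 0 with hneg | hzero | hpos
  · have hcs : cs = [] := by
      rcases hpre with h | h
      · omega
      · exact h
    subst hcs
    exact pv_empty_neg k hneg
  · subst hzero
    exact pv_zero_case cs
  · rw [pv_A_eq_ref cs k (by omega), pv_B_eq cs k (by omega)]
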